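-- pv_equiv track=rewrite | github.com/goralczm/Notedock | notedock/notedock.py | get_valid_name
-- ===== SOURCE A (Python) =====
-- from typing import Dict
--
-- def get_valid_name(d: Dict, name: str) -> str:
--     name_split = name.split(' ')
--     if name_split[-1].isnumeric():
--         original_name = ' '.join(name_split[:-1])
--     else:
--         original_name = name
--     index = 1
--     while name in list(d.keys()):
--         name = f'{original_name} {index}'
--         index += 1
--
--     return name
-- ===== SOURCE B (Python) =====
-- def get_valid_name(d, name):
--     name_split = name.split(' ')
--     if name_split[-1].isnumeric():
--         original_name = ' '.join(name_split[:-1])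
--     else:
--         original_name = name
--     if name not in d:
--         return name
--     prefix = original_name + ' '
--     used = {key[len(prefix):] for key in d if key.startswith(prefix)}
--     i = 1
--     while str(i) in used:
--         i += 1
--     return prefix + str(i)
-- ===== Notes on version B (the rewrite author's own statement) =====
-- stated objective: alternative
-- what changed: Instead of regenerating candidate names and re-scanning the dict's key list for each one, B makes a single pass over the keys collecting the suffixes after 'original_name ' into a set, then returns the first index i whose str(i) is not in that set.
import Mathlib
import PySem

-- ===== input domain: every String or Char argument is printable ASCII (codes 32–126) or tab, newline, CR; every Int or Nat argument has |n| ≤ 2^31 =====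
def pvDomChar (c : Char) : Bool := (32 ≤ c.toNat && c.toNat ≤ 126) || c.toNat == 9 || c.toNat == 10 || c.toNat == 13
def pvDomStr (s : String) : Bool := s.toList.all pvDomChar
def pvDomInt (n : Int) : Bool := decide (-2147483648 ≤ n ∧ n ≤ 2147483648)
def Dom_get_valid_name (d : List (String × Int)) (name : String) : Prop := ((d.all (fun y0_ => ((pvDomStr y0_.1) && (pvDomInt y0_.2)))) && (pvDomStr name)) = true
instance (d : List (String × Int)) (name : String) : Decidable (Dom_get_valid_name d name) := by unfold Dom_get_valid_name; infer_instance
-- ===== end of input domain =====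

-- B replaces A's retry loop (regenerate a candidate, rescan the key list) by one pass over the
-- keys collecting the suffixes after 'original_name ' into a set, then taking the first free index.

-- ===== PORT A =====
-- A's while loop; fuel d.length + 2 is always sufficient: the candidates 'orig i' are pairwise
-- distinct, so at most |keys| of them (plus the initial name) can test positive.
def pvALoop (keys : List String) (orig : String) : String → Int → Nat → String
  | name, _, 0 => name
  | name, index, fuel+1 =>
    if name ∈ keys then
      pvALoop keys orig (orig ++ " " ++ PySem.Int.toStr index) (index + 1) fuel
    else name

def get_valid_name (d : List (String × Int)) (name : String) : String :=
  let name_split := (PySem.Str.split? name " ").getD []   -- sep " " ≠ "": split? is never none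
  let original_name :=
    -- name.split(' ') is never empty, so pyGet? (-1) is never none; Python's isnumeric
    -- coincides with isdigit on the printable-ASCII domain
    if PySem.Str.strIsdigit ((PySem.List.pyGet? name_split (-1)).getD "") then
      PySem.Str.join " " (PySem.List.slice name_split none (some (-1)))
    else name
  pvALoop ((PySem.Dict.mk d).keys) original_name name 1 (d.length + 2)

-- ===== PORT B =====
-- B's gap-scan loop; fuel d.length + 1 is always sufficient: used holds at most |keys| strings.
def pvBLoop (used : PySem.Set String) : Int → Nat → Int
  | i, 0 => i
  | i, fuel+1 =>
    if PySem.Set.contains used (PySem.Int.toStr i) then pvBLoop used (i + 1) fuel else i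

def get_valid_name_alt (d : List (String × Int)) (name : String) : String :=
  let name_split := (PySem.Str.split? name " ").getD []   -- sep " " ≠ "": split? is never none
  let original_name :=
    if PySem.Str.strIsdigit ((PySem.List.pyGet? name_split (-1)).getD "") then
      PySem.Str.join " " (PySem.List.slice name_split none (some (-1)))
    else name
  if (PySem.Dict.mk d).contains name = false then name
  else
    let pre := original_name ++ " "
    let used : PySem.Set String :=
      PySem.Set.ofList
        ((((PySem.Dict.mk d).keys).filter (fun k => PySem.Str.startswith k pre)).map
          (fun k => PySem.Str.slice k (some (PySem.Str.len pre)) none))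
    pre ++ PySem.Int.toStr (pvBLoop used 1 (d.length + 1))

-- ===== PRECONDITION & SPEC =====
def Spec_get_valid_name (d : List (String × Int)) (name : String) (out : String) : Prop := out = get_valid_name_alt d name
instance (d : List (String × Int)) (name : String) (out : String) : Decidable (Spec_get_valid_name d name out) := by unfold Spec_get_valid_name; infer_instance

-- ===== CLAIM (what is proved, stated in full; the proofs are below) =====
def Claim_equal_get_valid_name : Prop := ∀ (d : List (String × Int)) (name : String), Dom_get_valid_name d name → Spec_get_valid_name d name (get_valid_name d name)

-- ===== LEMMAS AND PROOFS =====

-- a key equals pre ++ s iff it starts with pre and its tail slice is s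
theorem pv_key_decomp (k pre s : String) :
    (PySem.Str.startswith k pre = true ∧ PySem.Str.slice k (some (PySem.Str.len pre)) none = s)
      ↔ k = pre ++ s := by
  rw [PySem.Str.startswith_eq,
    ← @String.toList_inj (PySem.Str.slice k (some (PySem.Str.len pre)) none) s,
    PySem.Str.toList_slice, PySem.Str.len_eq, PySem.Chars.startswith_iff]
  have hsl : PySem.Chars.slice k.toList (some (pre.toList.length : Int)) none
      = k.toList.drop pre.toList.length := by
    show PySem.List.slice _ _ _ = _
    rw [PySem.List.slice_from k.toList (Int.natCast_nonneg _)]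
    simp
  rw [hsl]
  constructor
  · rintro ⟨⟨t, ht⟩, hdrop⟩
    rw [← ht] at hdrop
    simp at hdrop
    apply String.toList_inj.mp
    rw [String.toList_append, ← ht, hdrop]
  · rintro h
    subst h
    rw [String.toList_append]
    exact ⟨⟨s.toList, rfl⟩, by simp⟩

-- membership of a candidate among the keys matches membership of its suffix in B's set
theorem pv_mem_equiv (keys : List String) (pre : String) (j : Int) :
    (pre ++ PySem.Int.toStr j) ∈ keys ↔
      PySem.Set.contains
        (PySem.Set.ofList ((keys.filter (fun k => PySem.Str.startswith k pre)).map
          (fun k => PySem.Str.slice k (some (PySem.Str.len pre)) none)))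
        (PySem.Int.toStr j) = true := by
  rw [PySem.Set.contains_iff, PySem.Set.mem_ofList, List.mem_map]
  constructor
  · intro h
    refine ⟨pre ++ PySem.Int.toStr j, ?_, ?_⟩
    · rw [List.mem_filter]
      exact ⟨h, ((pv_key_decomp _ pre _).mpr rfl).1⟩
    · exact ((pv_key_decomp _ pre _).mpr rfl).2
  · rintro ⟨k, hk, hs⟩
    rw [List.mem_filter] at hk
    have := (pv_key_decomp k pre (PySem.Int.toStr j)).mp ⟨hk.2, hs⟩
    rw [← this]
    exact hk.1

-- the two loops advance in lockstep
theorem pv_lockstep (keys : List String) (orig : String) (used : PySem.Set String)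
    (H : ∀ j : Int, ((orig ++ " ") ++ PySem.Int.toStr j) ∈ keys ↔
          PySem.Set.contains used (PySem.Int.toStr j) = true) :
    ∀ (fuel : Nat) (i : Int),
      pvALoop keys orig ((orig ++ " ") ++ PySem.Int.toStr i) (i + 1) fuel
        = (orig ++ " ") ++ PySem.Int.toStr (pvBLoop used i fuel) := by
  intro fuel
  induction fuel with
  | zero => intro i; rfl
  | succ fuel ih =>
    intro i
    rw [pvALoop, pvBLoop]
    by_cases h : ((orig ++ " ") ++ PySem.Int.toStr i) ∈ keys
    · rw [if_pos h, if_pos ((H i).mp h)]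
      exact ih (i + 1)
    · rw [if_neg h, if_neg (fun hc => h ((H i).mpr hc))]

-- ===== VERDICT (by name: the statement is the Claim_ definition above) =====
theorem get_valid_name_spec : Claim_equal_get_valid_name := by
  intro d name _
  unfold Spec_get_valid_name get_valid_name get_valid_name_alt
  set keys := (PySem.Dict.mk d).keys with hkeys
  set orig := (if PySem.Str.strIsdigit ((PySem.List.pyGet? ((PySem.Str.split? name " ").getD []) (-1)).getD "") then
      PySem.Str.join " " (PySem.List.slice ((PySem.Str.split? name " ").getD []) none (some (-1)))
    else name) with horig
  by_cases h : name ∈ keys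
  · have hc : (PySem.Dict.mk d).contains name = true :=
      (PySem.Dict.contains_iff_mem_keys _ _).mpr h
    rw [if_neg (by simp [hc])]
    show pvALoop keys orig name 1 (d.length + 1 + 1) = _
    rw [pvALoop, if_pos h]
    exact pv_lockstep keys orig _ (fun j => pv_mem_equiv keys (orig ++ " ") j) (d.length + 1) 1
  · have hc : (PySem.Dict.mk d).contains name = false := by
      by_contra hcn
      exact h ((PySem.Dict.contains_iff_mem_keys _ _).mp (by simpa using hcn))
    rw [if_pos (by simp [hc])]
    show pvALoop keys orig name 1 (d.length + 1 + 1) = name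
    rw [pvALoop, if_neg h]
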